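-- pv_equiv track=rewrite | github.com/josejoby/programming_questions | python/number_colorful.py | solve
-- ===== SOURCE A (Python) =====
-- def solve(A): # using a set and pre and post cumulative product approach
--     seen = set()
--     S = str(A)
--     for d in S:
--         if int(d) in seen:
--             return 0
--         seen.add(int(d))
--     tmp = int(S[0])
--     for i in range(1, len(S)):
--         tmp = tmp*int(S[i])
--         if tmp in seen:
--             return 0
--         seen.add(tmp)
--     tmp=int(S[len(S)-1])
--     for i in range(len(S)-2, 0, -1): # not including last element,as its already added in prev loop
--         tmp = tmp*int(S[i])
--         if tmp in seen:
--             return 0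
--         seen.add(tmp)
--     return 1
-- ===== SOURCE B (Python) =====
-- def _prods(p, ds):
--     # running products p*ds[0], p*ds[0]*ds[1], ..., built by recursion
--     if not ds:
--         return []
--     q = p * ds[0]
--     return [q] + _prods(q, ds[1:])
--
-- def solve(A):
--     ds = [int(c) for c in str(A)]
--     vals = ds + _prods(ds[0], ds[1:]) + _prods(ds[-1], ds[-2:0:-1])
--     vals.sort()
--     return int(all(x < y for x, y in zip(vals, vals[1:])))
-- ===== Notes on version B (the rewrite author's own statement) =====
-- stated objective: alternative
-- what changed: B builds the running prefix/suffix products by a recursive helper instead of A's index loops and decides distinctness without any hash set or early return: it sorts the collected values once and checks that adjacent pairs are strictly increasing (sort-and-scan instead of incremental set membership).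
import Mathlib
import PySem

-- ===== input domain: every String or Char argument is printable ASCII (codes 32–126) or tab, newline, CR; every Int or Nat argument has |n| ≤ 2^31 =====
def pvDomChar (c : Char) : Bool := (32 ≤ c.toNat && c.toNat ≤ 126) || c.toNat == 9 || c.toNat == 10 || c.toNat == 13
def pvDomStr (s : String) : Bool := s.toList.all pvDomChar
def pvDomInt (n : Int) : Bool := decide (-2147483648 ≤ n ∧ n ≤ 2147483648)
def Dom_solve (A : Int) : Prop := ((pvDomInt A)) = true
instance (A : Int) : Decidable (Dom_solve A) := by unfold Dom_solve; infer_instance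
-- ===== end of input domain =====

-- B drops A's hash set and early returns: it generates the running products by recursion and decides
-- distinctness by sorting the values and checking that adjacent pairs are strictly increasing.

-- ===== PORT A =====
-- int(d) for a one-character string; `.getD 0` is the ValueError path (reached only for A < 0, excluded by Pre_solve)
def digitVal (c : Char) : Int := (PySem.Int.ofChars? [c]).getD 0

-- 'for d in S: if int(d) in seen: return 0 ; seen.add(int(d))'  (none = the early `return 0`)
def digitLoop (seen : PySem.Set Int) : List Char → Option (PySem.Set Int)
  | [] => some seen
  | c :: rest =>
    if PySem.Set.contains seen (digitVal c) then none
    else digitLoop (PySem.Set.add seen (digitVal c)) rest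

-- A's two product loops have the identical body 'tmp = tmp*int(S[i]); if tmp in seen: return 0; seen.add(tmp)';
-- this is that loop, recursing over the chars the index range enumerates
def prodLoop (seen : PySem.Set Int) (tmp : Int) : List Char → Option (PySem.Set Int)
  | [] => some seen
  | c :: rest =>
    if PySem.Set.contains seen (tmp * digitVal c) then none
    else prodLoop (PySem.Set.add seen (tmp * digitVal c)) (tmp * digitVal c) rest

def solve (A : Int) : Int :=
  let S := PySem.Int.toChars A                                -- S = str(A)
  match digitLoop PySem.Set.empty S with                      -- seen = set(); for d in S: …
  | none => 0
  | some seen =>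
    -- tmp = int(S[0]); for i in range(1, len(S)): …   (S is never empty; headD's default is unreachable)
    match prodLoop seen (digitVal (S.headD ' ')) (S.drop 1) with
    | none => 0
    | some seen2 =>
      -- tmp = int(S[len(S)-1]); for i in range(len(S)-2, 0, -1): …  — the chars S[len-2] … S[1]
      match prodLoop seen2 (digitVal (S.getLastD ' ')) ((S.drop 1).dropLast.reverse) with
      | none => 0
      | some _ => 1

-- ===== PORT B =====
-- _prods(p, ds): if not ds: return [] ; q = p*ds[0] ; return [q] + _prods(q, ds[1:])
def prodsB (p : Int) : List Int → List Int
  | [] => []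
  | d :: rest => (p * d) :: prodsB (p * d) rest

def solve_alt (A : Int) : Int :=
  let ds := (PySem.Int.toChars A).map digitVal                -- ds = [int(c) for c in str(A)]
  -- ds is never empty for an int; headD/getLastD defaults are the unreachable IndexError of ds[0]/ds[-1].
  -- ds[-2:0:-1] (indices len-2 … 1) is exactly ds.tail.dropLast.reverse.
  let vals := ds ++ prodsB (ds.headD 0) (ds.drop 1)
      ++ prodsB (ds.getLastD 0) (ds.tail.dropLast.reverse)
  let s := PySem.List.sorted vals (fun x => x) false          -- vals.sort()
  if (s.zip (s.drop 1)).all (fun p => decide (p.1 < p.2)) then 1 else 0   -- all(x < y for x,y in zip(…))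

-- ===== PRECONDITION & SPEC =====
-- Pre_ excludes negative A, where str(A) starts with '-' and int('-') raises ValueError in A (and in B).
def Pre_solve (A : Int) : Prop := 0 ≤ A
instance (A : Int) : Decidable (Pre_solve A) := by unfold Pre_solve; infer_instance
def pvWitness_solve : Int := 3245

def Spec_solve (A : Int) (out : Int) : Prop := out = solve_alt A
instance (A : Int) (out : Int) : Decidable (Spec_solve A out) := by unfold Spec_solve; infer_instance

-- ===== CLAIM (what is proved, stated in full; the proofs are below) =====
def Claim_equal_solve : Prop := ∀ (A : Int), Dom_solve A → Pre_solve A → Spec_solve A (solve A)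

-- ===== LEMMAS AND PROOFS =====

-- the common shape of A's three loops: push values into `seen`, stop with none at the first repeat
def dupScan (seen : PySem.Set Int) : List Int → Option (PySem.Set Int)
  | [] => some seen
  | x :: rest =>
    if PySem.Set.contains seen x then none else dupScan (PySem.Set.add seen x) rest

theorem digitLoop_eq (cs : List Char) : ∀ s, digitLoop s cs = dupScan s (cs.map digitVal) := by
  induction cs with
  | nil => intro s; rfl
  | cons c rest ih =>
    intro s
    simp only [digitLoop, List.map, dupScan]
    split
    · rfl
    · exact ih _

theorem prodLoop_eq (cs : List Char) : ∀ s t,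
    prodLoop s t cs = dupScan s (prodsB t (cs.map digitVal)) := by
  induction cs with
  | nil => intro s t; rfl
  | cons c rest ih =>
    intro s t
    simp only [prodLoop, List.map, prodsB, dupScan]
    split
    · rfl
    · exact ih _ _

theorem containsF (s : PySem.Set Int) (x : Int) (hx : x ∉ (s : List Int)) :
    PySem.Set.contains s x = false :=
  Bool.eq_false_iff.mpr (fun hT => hx ((PySem.Set.contains_iff s x).1 hT))

theorem addF (s : PySem.Set Int) (x : Int) (hx : x ∉ (s : List Int)) :
    PySem.Set.add s x = s ++ [x] := by
  unfold PySem.Set.add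
  rw [containsF s x hx]
  simp

theorem nodup_snoc (s : PySem.Set Int) (x : Int) (hs : (s : List Int).Nodup)
    (hx : x ∉ (s : List Int)) : ((s : List Int) ++ [x]).Nodup := by
  rw [List.nodup_append]
  refine ⟨hs, List.nodup_singleton x, ?_⟩
  intro a ha b hb
  simp only [List.mem_singleton] at hb
  subst hb
  exact fun h => hx (h ▸ ha)

theorem dupScan_some (l : List Int) : ∀ s : PySem.Set Int, ((s : List Int) ++ l).Nodup →
    dupScan s l = some (s ++ l) := by
  induction l with
  | nil => intro s _; simp [dupScan]
  | cons x rest ih =>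
    intro s h
    have hx : x ∉ (s : List Int) := fun hm =>
      (List.disjoint_of_nodup_append h) hm List.mem_cons_self
    simp only [dupScan, containsF s x hx, Bool.false_eq_true, if_false, addF s x hx]
    rw [ih (s ++ [x]) (by simpa using h)]
    simp

theorem dupScan_none (l : List Int) : ∀ s : PySem.Set Int, (s : List Int).Nodup →
    ¬ ((s : List Int) ++ l).Nodup → dupScan s l = none := by
  induction l with
  | nil => intro s hs h; exact absurd (by simpa using hs) h
  | cons x rest ih =>
    intro s hs h
    by_cases hx : x ∈ (s : List Int)
    · have hc : PySem.Set.contains s x = true := (PySem.Set.contains_iff s x).2 hx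
      simp only [dupScan, hc, if_true]
    · simp only [dupScan, containsF s x hx, Bool.false_eq_true, if_false, addF s x hx]
      exact ih (s ++ [x]) (nodup_snoc s x hs hx) (fun hn => h (by simpa using hn))

-- 'all(x < y for x, y in zip(l, l[1:]))' says the list is an ascending chain
theorem zipAll_iff_chain (l : List Int) :
    ((l.zip (l.drop 1)).all (fun p => decide (p.1 < p.2)) = true) ↔ l.IsChain (· < ·) := by
  induction l with
  | nil => simp
  | cons x rest ih =>
    cases rest with
    | nil => simp
    | cons y t =>
      rw [List.isChain_cons_cons, ← ih]
      simp

-- sorting then checking adjacent strict increase decides distinctness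
theorem sorted_zipAll_iff_nodup (v : List Int) :
    (((PySem.List.sorted v (fun x => x) false).zip
        ((PySem.List.sorted v (fun x => x) false).drop 1)).all
        (fun p => decide (p.1 < p.2)) = true) ↔ v.Nodup := by
  set s := PySem.List.sorted v (fun x => x) false with hs
  have hperm : s.Perm v := PySem.List.sorted_perm v (fun x => x) false
  have hle : s.Pairwise (· ≤ ·) := by
    have := PySem.List.sorted_pairwise v (fun x => x)
    simpa using this
  rw [zipAll_iff_chain, List.isChain_iff_pairwise]
  constructor
  · intro h
    exact hperm.nodup_iff.mp (h.imp ne_of_lt)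
  · intro h
    have hne : s.Nodup := hperm.nodup_iff.mpr h
    exact (hle.and hne).imp (fun hab => lt_of_le_of_ne hab.1 hab.2)

theorem main_eq (A : Int) : solve A = solve_alt A := by
  unfold solve solve_alt
  generalize PySem.Int.toChars A = S
  cases S with
  | nil => decide
  | cons c cs =>
    simp only [digitLoop_eq, prodLoop_eq, List.headD_cons, List.drop_succ_cons, List.drop_zero,
      List.map_cons]
    have hlast : (digitVal c :: cs.map digitVal).getLastD 0 = digitVal ((c :: cs).getLastD ' ') := by
      rw [List.getLastD_eq_getLast?, List.getLastD_eq_getLast?, ← List.map_cons,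
        List.getLast?_map]
      cases hg : (c :: cs).getLast? with
      | none => simp at hg
      | some g => simp
    have htail : (digitVal c :: cs.map digitVal).tail.dropLast.reverse
        = (cs.dropLast.reverse).map digitVal := by
      simp [← List.map_dropLast, ← List.map_reverse]
    simp only [hlast, htail]
    set M : List Int := digitVal c :: cs.map digitVal with hM
    set pref : List Int := prodsB (digitVal c) (cs.map digitVal) with hpref
    set suff : List Int := prodsB (digitVal ((c :: cs).getLastD ' '))
        ((cs.dropLast.reverse).map digitVal) with hsuff
    have hBnodup := sorted_zipAll_iff_nodup (M ++ pref ++ suff)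
    by_cases hv : (M ++ pref ++ suff).Nodup
    · have h1 : M.Nodup := (List.append_assoc M pref suff ▸ hv).of_append_left
      have h2 : (M ++ pref).Nodup := hv.of_append_left
      have e1 : dupScan PySem.Set.empty M = some M := by
        have := dupScan_some M ([] : PySem.Set Int) (by simpa using h1)
        simpa [PySem.Set.empty] using this
      have e2 : dupScan M pref = some (M ++ pref) := dupScan_some pref M h2
      have e3 : dupScan (M ++ pref) suff = some (M ++ pref ++ suff) :=
        dupScan_some suff (M ++ pref) hv
      simp only [e1, e2, e3]
      rw [if_pos (hBnodup.mpr hv)]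
    · rw [if_neg (fun h => hv (hBnodup.mp h))]
      by_cases h1 : M.Nodup
      · have e1 : dupScan PySem.Set.empty M = some M := by
          have := dupScan_some M ([] : PySem.Set Int) (by simpa using h1)
          simpa [PySem.Set.empty] using this
        by_cases h2 : (M ++ pref).Nodup
        · have e2 : dupScan M pref = some (M ++ pref) := dupScan_some pref M h2
          have e3 : dupScan (M ++ pref) suff = none := dupScan_none suff (M ++ pref) h2 hv
          simp only [e1, e2, e3]
        · have e2 : dupScan M pref = none := dupScan_none pref M h1 h2
          simp only [e1, e2]
      · have e1 : dupScan PySem.Set.empty M = none := by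
          have := dupScan_none M ([] : PySem.Set Int) (by simp) (by simpa using h1)
          simpa [PySem.Set.empty] using this
        simp only [e1]

-- ===== VERDICT (by name: the statement is the Claim_ definition above) =====
theorem solve_spec : Claim_equal_solve := by
  intro A _ _
  unfold Spec_solve
  exact main_eq A
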